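-- pv_equiv track=rewrite | github.com/iemejia/emilio | emilio/gol-inference/parse_mc.py | parse_rle_leaf
-- ===== SOURCE A (Python) =====
-- def parse_rle_leaf(rle_str, size):
--     """Parse an RLE-encoded leaf node into alive cell offsets."""
--     cells = []
--     row, col = 0, 0
--     i = 0
--     while i < len(rle_str):
--         ch = rle_str[i]
--         if ch == '$':
--             row += 1
--             col = 0
--             i += 1
--         elif ch == '*':
--             if row < size and col < size:
--                 cells.append((row, col))
--             col += 1
--             i += 1
--         elif ch == '.':
--             col += 1
--             i += 1
--         elif ch.isdigit():
--             j = i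
--             while j < len(rle_str) and rle_str[j].isdigit():
--                 j += 1
--             count = int(rle_str[i:j])
--             if j < len(rle_str):
--                 ch2 = rle_str[j]
--                 if ch2 == '*':
--                     for _ in range(count):
--                         if row < size and col < size:
--                             cells.append((row, col))
--                         col += 1
--                     j += 1
--                 elif ch2 == '.':
--                     col += count
--                     j += 1
--                 elif ch2 == '$':
--                     row += count
--                     col = 0
--                     j += 1
--             i = j
--         else:
--             i += 1
--     return cells
-- ===== SOURCE B (Python) =====
-- def parse_rle_leaf(rle_str, size):
--     """Parse an RLE-encoded leaf node into alive cell offsets.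
--     Two phases: lex into (count, symbol) tokens, then interpret them."""
--     # Phase 1: tokenize
--     tokens = []
--     n = len(rle_str)
--     i = 0
--     while i < n:
--         ch = rle_str[i]
--         if ch.isdigit():
--             j = i
--             while j < n and rle_str[j].isdigit():
--                 j += 1
--             count = int(rle_str[i:j])
--             if j < n and rle_str[j] in '*.$':
--                 tokens.append((count, rle_str[j]))
--                 j += 1
--             i = j
--         elif ch in '*.$':
--             tokens.append((1, ch))
--             i += 1
--         else:
--             i += 1
--     # Phase 2: interpret
--     cells = []
--     row, col = 0, 0
--     for count, sym in tokens:
--         if sym == '$':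
--             row += count
--             col = 0
--         elif sym == '.':
--             col += count
--         else:  # '*'
--             for _ in range(count):
--                 if row < size and col < size:
--                     cells.append((row, col))
--                 col += 1
--     return cells
-- ===== Notes on version B (the rewrite author's own statement) =====
-- stated objective: alternative
-- what changed: B separates A's single interleaved scan into two phases: a lexer that turns the string into (count, symbol) tokens, then an interpreter that folds the tokens into row/col state and emits cells; A's bare-symbol and counted-symbol branches collapse into one interpreter case.
import Mathlib
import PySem

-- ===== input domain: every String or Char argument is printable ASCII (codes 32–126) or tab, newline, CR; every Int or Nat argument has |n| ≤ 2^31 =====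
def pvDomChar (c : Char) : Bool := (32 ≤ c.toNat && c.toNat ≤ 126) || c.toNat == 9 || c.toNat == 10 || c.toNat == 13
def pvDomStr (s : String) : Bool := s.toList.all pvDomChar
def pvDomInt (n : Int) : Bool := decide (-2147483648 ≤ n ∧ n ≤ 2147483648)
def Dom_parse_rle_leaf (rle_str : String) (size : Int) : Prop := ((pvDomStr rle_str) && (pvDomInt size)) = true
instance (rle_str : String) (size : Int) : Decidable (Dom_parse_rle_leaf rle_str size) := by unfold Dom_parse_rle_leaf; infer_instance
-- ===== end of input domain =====

-- B restructures A's single interleaved scan into two phases — lex into (count, symbol) tokens, then interpret the tokens — an alternative decomposition of the same cost.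

-- ===== PORT A =====
-- the inner `while j < n and rle_str[j].isdigit(): j += 1` digit scan (this code appears verbatim in both A and B's Python)
def pvDigitSpan : List Char → List Char × List Char
  | [] => ([], [])
  | c :: rest =>
    if PySem.Chars.isdigit c then
      ((c :: (pvDigitSpan rest).1), (pvDigitSpan rest).2)
    else ([], c :: rest)

-- needed by the ports' termination proofs (cited in decreasing_by)
theorem pvDigitSpan_len (l : List Char) : (pvDigitSpan l).2.length ≤ l.length := by
  induction l with
  | nil => simp [pvDigitSpan]
  | cons c rest ih =>
    simp only [pvDigitSpan]
    split
    · exact Nat.le_succ_of_le ih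
    · simp

-- int(rle_str[i:j]): the span is a nonempty run of ASCII digits, so ofChars? is always some (the getD 0 default is unreachable)
def pvCount (ds : List Char) : Int := (PySem.Int.ofChars? ds).getD 0

-- `for _ in range(count): if row < size and col < size: cells.append((row, col)); col += 1`
-- (this loop appears verbatim in both A's counted-'*' branch and B's interpreter); returns the cells the loop appends
def pvStars (size row col : Int) : Nat → List (Int × Int)
  | 0 => []
  | k + 1 => (if row < size ∧ col < size then [(row, col)] else []) ++ pvStars size row (col + 1) k

-- A's `while i < len(rle_str)` loop, as recursion on the remaining characters; returns the cells appended from this point on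
def parse_rle_leaf_go (size : Int) : List Char → Int → Int → List (Int × Int)
  | [], _, _ => []
  | c :: rest, row, col =>
    if c = '$' then parse_rle_leaf_go size rest (row + 1) 0
    else if c = '*' then
      (if row < size ∧ col < size then [(row, col)] else []) ++ parse_rle_leaf_go size rest row (col + 1)
    else if c = '.' then parse_rle_leaf_go size rest row (col + 1)
    else if PySem.Chars.isdigit c then
      let count := pvCount (c :: (pvDigitSpan rest).1)
      match h : (pvDigitSpan rest).2 with
      | [] => []
      | s :: r2 =>
        if s = '*' then pvStars size row col count.toNat ++ parse_rle_leaf_go size r2 row (col + (count.toNat : Int))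
        else if s = '.' then parse_rle_leaf_go size r2 row (col + count)
        else if s = '$' then parse_rle_leaf_go size r2 (row + count) 0
        else parse_rle_leaf_go size (s :: r2) row col
    else parse_rle_leaf_go size rest row col
  termination_by l => l.length
  decreasing_by
  all_goals simp_all
  all_goals (have := pvDigitSpan_len rest; rw [h] at this; simp at this; omega)

def parse_rle_leaf (rle_str : String) (size : Int) : List (Int × Int) :=
  parse_rle_leaf_go size rle_str.toList 0 0

-- ===== PORT B =====
-- Phase 1: lex the string into (count, symbol) tokens, symbol ∈ {*, ., $}
def pvTokenize : List Char → List (Int × Char)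
  | [] => []
  | c :: rest =>
    if PySem.Chars.isdigit c then
      let count := pvCount (c :: (pvDigitSpan rest).1)
      match h : (pvDigitSpan rest).2 with
      | [] => []
      | s :: r2 =>
        if s = '*' ∨ s = '.' ∨ s = '$' then (count, s) :: pvTokenize r2
        else pvTokenize (s :: r2)
    else if c = '*' ∨ c = '.' ∨ c = '$' then (1, c) :: pvTokenize rest
    else pvTokenize rest
  termination_by l => l.length
  decreasing_by
  all_goals simp_all
  all_goals (have := pvDigitSpan_len rest; rw [h] at this; simp at this; omega)

-- Phase 2: interpret the tokens, folding row/col state and emitting cells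
def pvInterp (size : Int) : List (Int × Char) → Int → Int → List (Int × Int)
  | [], _, _ => []
  | (count, s) :: ts, row, col =>
    if s = '$' then pvInterp size ts (row + count) 0
    else if s = '.' then pvInterp size ts row (col + count)
    else pvStars size row col count.toNat ++ pvInterp size ts row (col + (count.toNat : Int))

def parse_rle_leaf_alt (rle_str : String) (size : Int) : List (Int × Int) :=
  pvInterp size (pvTokenize rle_str.toList) 0 0

-- ===== PRECONDITION & SPEC =====
def Spec_parse_rle_leaf (rle_str : String) (size : Int) (out : List (Int × Int)) : Prop := out = parse_rle_leaf_alt rle_str size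
instance (rle_str : String) (size : Int) (out : List (Int × Int)) : Decidable (Spec_parse_rle_leaf rle_str size out) := by unfold Spec_parse_rle_leaf; infer_instance

-- ===== CLAIM (what is proved, stated in full; the proofs are below) =====
def Claim_equal_parse_rle_leaf : Prop := ∀ (rle_str : String) (size : Int), Dom_parse_rle_leaf rle_str size → Spec_parse_rle_leaf rle_str size (parse_rle_leaf rle_str size)

-- ===== LEMMAS AND PROOFS =====
theorem go_eq_interp_tokenize (size : Int) (l : List Char) (row col : Int) :
    parse_rle_leaf_go size l row col = pvInterp size (pvTokenize l) row col := by
  induction l, row, col using parse_rle_leaf_go.induct with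
  | case1 => rw [parse_rle_leaf_go.eq_1, pvTokenize.eq_1]; rfl
  | case2 rest row col ih =>
    rw [parse_rle_leaf_go.eq_2, pvTokenize.eq_2]
    simp [pvInterp, PySem.Chars.isdigit, ih]
  | case3 rest row col h1 ih =>
    rw [parse_rle_leaf_go.eq_2, pvTokenize.eq_2]
    simp [pvInterp, pvStars, PySem.Chars.isdigit, ih]
  | case4 rest row col h1 h2 ih =>
    rw [parse_rle_leaf_go.eq_2, pvTokenize.eq_2]
    simp [pvInterp, PySem.Chars.isdigit, ih]
  | case5 c rest row col h1 h2 h3 hd hspan =>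
    rw [parse_rle_leaf_go.eq_2, pvTokenize.eq_2, hspan]
    simp [pvInterp, h1, h2, h3, hd]
  | case6 c rest row col h1 h2 h3 hd count r2 hspan ih =>
    rw [parse_rle_leaf_go.eq_2, pvTokenize.eq_2, hspan]
    simp [pvInterp, h1, h2, h3, hd]
    simpa using ih
  | case7 c rest row col h1 h2 h3 hd count r2 hspan hne ih =>
    rw [parse_rle_leaf_go.eq_2, pvTokenize.eq_2, hspan]
    simp [pvInterp, h1, h2, h3, hd]
    simpa using ih
  | case8 c rest row col h1 h2 h3 hd count r2 hspan hn1 hn2 ih =>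
    rw [parse_rle_leaf_go.eq_2, pvTokenize.eq_2, hspan]
    simp [pvInterp, h1, h2, h3, hd]
    simpa using ih
  | case9 c rest row col h1 h2 h3 hd s r2 hspan hs1 hs2 hs3 ih =>
    rw [parse_rle_leaf_go.eq_2, pvTokenize.eq_2, hspan]
    simp [pvInterp, h1, h2, h3, hd, hs1, hs2, hs3, ih]
  | case10 c rest row col h1 h2 h3 h4 ih =>
    rw [parse_rle_leaf_go.eq_2, pvTokenize.eq_2]
    simp [h1, h2, h3, h4, ih]

-- ===== VERDICT (by name: the statement is the Claim_ definition above) =====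
theorem parse_rle_leaf_spec : Claim_equal_parse_rle_leaf := by
  intro s size _
  unfold Spec_parse_rle_leaf parse_rle_leaf parse_rle_leaf_alt
  exact go_eq_interp_tokenize size s.toList 0 0
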